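-- pv_equiv track=rewrite | github.com/IIIT-Ranchi-CS2001/lab-codes-2023b-kasturi4237 | lab7(2).py | separate_prime_composite
-- ===== SOURCE A (Python) =====
-- import math
--
-- def separate_prime_composite(numbers):
--     primes = []
--     composites = []
--     for num in numbers:
--         if num < 2:
--             composites.append(num)
--         elif all(num % i != 0 for i in range(2, int(math.sqrt(num)) + 1)):
--             primes.append(num)
--         else:
--             composites.append(num)
--     return primes, composites
-- ===== SOURCE B (Python) =====
-- import math
--
-- def separate_prime_composite(numbers):
--     # Stage 1: largest value (at least 1) -> sieve bound sqrt(max)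
--     m = 1
--     for n in numbers:
--         if n > m:
--             m = n
--     limit = math.isqrt(m)
--     # Stage 2: Sieve of Eratosthenes up to limit
--     sieve = [True] * (limit + 1)
--     p = 2
--     while p <= limit:
--         if sieve[p]:
--             q = p * p
--             while q <= limit:
--                 sieve[q] = False
--                 q += p
--         p += 1
--     small_primes = [p for p in range(limit + 1) if p >= 2 and sieve[p]]
--     # Stage 3: classify by divisibility against the precomputed primes only
--     primes = []
--     composites = []
--     for n in numbers:
--         if n < 2:
--             composites.append(n)
--         elif any(p * p <= n and n % p == 0 for p in small_primes):
--             composites.append(n)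
--         else:
--             primes.append(n)
--     return primes, composites
-- ===== Notes on version B (the rewrite author's own statement) =====
-- stated objective: alternative
-- what changed: Replaces A's per-number trial division over all integers in range(2, sqrt(n)+1) by a staged algorithm: one pass finds the maximum, a Sieve of Eratosthenes precomputes the primes up to sqrt(max), and each number is then classified by divisibility against that precomputed prime list only.
import Mathlib
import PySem

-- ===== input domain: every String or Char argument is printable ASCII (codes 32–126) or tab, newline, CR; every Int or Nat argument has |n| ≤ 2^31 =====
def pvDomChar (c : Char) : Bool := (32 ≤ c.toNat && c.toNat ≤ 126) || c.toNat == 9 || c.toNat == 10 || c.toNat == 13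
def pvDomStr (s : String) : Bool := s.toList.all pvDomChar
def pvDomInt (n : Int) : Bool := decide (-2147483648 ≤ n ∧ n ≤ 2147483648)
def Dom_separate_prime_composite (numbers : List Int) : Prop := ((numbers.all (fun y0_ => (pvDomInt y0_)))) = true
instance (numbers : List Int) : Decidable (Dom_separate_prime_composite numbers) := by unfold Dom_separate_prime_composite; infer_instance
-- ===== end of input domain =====

-- B replaces A's per-number trial division over range(2, sqrt(n)+1) by a staged algorithm:
-- find the maximum, build a Sieve of Eratosthenes up to sqrt(max), then classify each number
-- against the precomputed prime list only.

-- ===== PORT A =====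
-- all(num % i != 0 for i in range(2, int(math.sqrt(num)) + 1)); int(math.sqrt(num)) is ported as
-- the integer square root, exact for 0 ≤ num ≤ 2^31 (double sqrt is correctly rounded below 2^52).
def pyIsPrimeScanA (num : Int) : Bool :=
  (PySem.List.pyRange 2 ((Nat.sqrt num.toNat : Int) + 1) 1).all
    (fun i => decide (PySem.Int.mod num i ≠ 0))

def separate_prime_composite (numbers : List Int) : List Int × List Int :=
  numbers.foldl
    (fun acc num =>
      if num < 2 then (acc.1, acc.2 ++ [num])
      else if pyIsPrimeScanA num then (acc.1 ++ [num], acc.2)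
      else (acc.1, acc.2 ++ [num]))
    ([], [])

-- ===== PORT B =====
-- the inner 'while q <= limit: sieve[q] = False; q += p' loop; q, p, limit are nonnegative
-- Python ints, ported over Nat; the '0 < p' conjunct only makes the recursion total (p ≥ 2 at
-- every call site).
def pvMark (s : List Bool) (limit q p : Nat) : List Bool :=
  if 0 < p ∧ q ≤ limit then pvMark (s.set q false) limit (q + p) p else s
termination_by limit + 1 - q

-- the outer 'while p <= limit' sieve loop
def pvSieveLoop (s : List Bool) (limit p : Nat) : List Bool :=
  if p ≤ limit then
    pvSieveLoop (if s.getD p false then pvMark s limit (p * p) p else s) limit (p + 1)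
  else s
termination_by limit + 1 - p

def separate_prime_composite_alt (numbers : List Int) : List Int × List Int :=
  let m : Int := numbers.foldl (fun m n => if n > m then n else m) 1
  let limit : Nat := Nat.sqrt m.toNat          -- math.isqrt(m), m ≥ 1
  let sieve := pvSieveLoop (List.replicate (limit + 1) true) limit 2
  let smallPrimes : List Nat :=
    (List.range (limit + 1)).filter (fun p => 2 ≤ p && sieve.getD p false)
  numbers.foldl
    (fun acc n =>
      if n < 2 then (acc.1, acc.2 ++ [n])
      else if smallPrimes.any (fun p => (p : Int) * p ≤ n && PySem.Int.mod n (p : Int) == 0) then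
        (acc.1, acc.2 ++ [n])
      else (acc.1 ++ [n], acc.2))
    ([], [])

-- ===== PRECONDITION & SPEC =====
def Spec_separate_prime_composite (numbers : List Int) (out : List Int × List Int) : Prop := out = separate_prime_composite_alt numbers
instance (numbers : List Int) (out : List Int × List Int) : Decidable (Spec_separate_prime_composite numbers out) := by unfold Spec_separate_prime_composite; infer_instance

-- ===== CLAIM (what is proved, stated in full; the proofs are below) =====
def Claim_equal_separate_prime_composite : Prop := ∀ (numbers : List Int), Dom_separate_prime_composite numbers → Spec_separate_prime_composite numbers (separate_prime_composite numbers)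

-- ===== LEMMAS AND PROOFS =====

-- A-side characterisation ------------------------------------------------

theorem sq_le_iff_le_sqrt (n i : Int) (hn : 0 ≤ n) (hi : 0 ≤ i) :
    i * i ≤ n ↔ i ≤ (Nat.sqrt n.toNat : Int) := by
  have h1 : i.toNat ≤ Nat.sqrt n.toNat ↔ i.toNat * i.toNat ≤ n.toNat := Nat.le_sqrt
  have h2 : (i.toNat : Int) = i := Int.toNat_of_nonneg hi
  have h3 : (n.toNat : Int) = n := Int.toNat_of_nonneg hn
  constructor
  · intro h
    have : i.toNat * i.toNat ≤ n.toNat := by zify; rw [h2, h3]; exact h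
    omega
  · intro h
    have : i.toNat ≤ Nat.sqrt n.toNat := by omega
    have := h1.mp this
    zify at this; rw [h2, h3] at this; exact this

theorem scanA_iff (n : Int) (hn : 2 ≤ n) :
    pyIsPrimeScanA n = true ↔ ∀ i : Int, 2 ≤ i → i * i ≤ n → ¬ i ∣ n := by
  unfold pyIsPrimeScanA
  rw [List.all_eq_true]
  constructor
  · intro h i h2 hsq
    have hmem : i ∈ PySem.List.pyRange 2 ((Nat.sqrt n.toNat : Int) + 1) 1 := by
      rw [PySem.List.mem_pyRange_one]
      have := (sq_le_iff_le_sqrt n i (by omega) (by omega)).mp hsq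
      omega
    have := h i hmem
    simp only [decide_eq_true_eq] at this
    intro hdvd
    exact this ((PySem.Int.mod_eq_zero_iff_dvd n i).mpr hdvd)
  · intro h i hmem
    rw [PySem.List.mem_pyRange_one] at hmem
    simp only [decide_eq_true_eq]
    intro hmod
    have hsq : i * i ≤ n :=
      (sq_le_iff_le_sqrt n i (by omega) (by omega)).mpr (by omega)
    exact h i hmem.1 hsq ((PySem.Int.mod_eq_zero_iff_dvd n i).mp hmod)

-- running maximum --------------------------------------------------------

theorem foldl_max_ge (l : List Int) (b : Int) :
    b ≤ l.foldl (fun m n => if n > m then n else m) b ∧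
    ∀ n ∈ l, n ≤ l.foldl (fun m n => if n > m then n else m) b := by
  induction l generalizing b with
  | nil => simp
  | cons x l ih =>
    simp only [List.foldl_cons, List.mem_cons]
    have h := ih (if x > b then x else b)
    constructor
    · exact le_trans (by split_ifs <;> omega) h.1
    · rintro n (rfl | hn)
      · exact le_trans (by split_ifs <;> omega) h.1
      · exact h.2 n hn

-- mark lemmas ------------------------------------------------------------

theorem pvMark_length (s : List Bool) (limit q p : Nat) :
    (pvMark s limit q p).length = s.length := by
  fun_induction pvMark s limit q p with
  | case1 s q h ih => rw [ih]; simp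
  | case2 => rfl

theorem pvMark_getD (s : List Bool) (limit q p : Nat) (hp : 0 < p)
    (hlen : limit < s.length) (j : Nat) :
    ((pvMark s limit q p).getD j false = false ↔
      s.getD j false = false ∨ (q ≤ j ∧ j ≤ limit ∧ p ∣ (j - q))) := by
  fun_induction pvMark s limit q p with
  | case1 s q h ih =>
    have hq : q < s.length := by omega
    rw [ih (by simpa)]
    have hset : (s.set q false).getD j false = if j = q then false else s.getD j false := by
      by_cases hj : j = q
      · subst hj
        rw [if_pos rfl]
        simp [List.getD_eq_getElem?_getD, List.getElem?_set_self hq]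
      · rw [if_neg hj]
        simp [List.getD_eq_getElem?_getD, List.getElem?_set_ne (show q ≠ j by omega)]
    rw [hset]
    by_cases hj : j = q
    · subst hj; simp [h.2]
    · rw [if_neg hj]
      constructor
      · rintro (hs | ⟨h1, h2, k, hk⟩)
        · exact Or.inl hs
        · refine Or.inr ⟨by omega, h2, ⟨k + 1, ?_⟩⟩
          rw [Nat.mul_succ]
          omega
      · rintro (hs | ⟨h1, h2, k, hk⟩)
        · exact Or.inl hs
        · cases k with
          | zero => omega
          | succ k' =>
            rw [Nat.mul_succ] at hk
            refine Or.inr ⟨by omega, h2, ⟨k', by omega⟩⟩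
  | case2 s q h =>
    have : ¬ (q ≤ j ∧ j ≤ limit ∧ p ∣ (j - q)) := by
      rintro ⟨h1, h2, _⟩; exact h ⟨hp, by omega⟩
    tauto

-- sieve invariant --------------------------------------------------------

theorem pvSieveLoop_getD (s : List Bool) (limit p : Nat) (hp : 2 ≤ p)
    (hlen : s.length = limit + 1)
    (hinv : ∀ j, j ≤ limit →
      (s.getD j false = false ↔ ∃ a, 2 ≤ a ∧ a < p ∧ a * a ≤ j ∧ a ∣ j)) :
    ∀ j, j ≤ limit →
      ((pvSieveLoop s limit p).getD j false = false ↔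
        ∃ a, 2 ≤ a ∧ a * a ≤ j ∧ a ∣ j) := by
  fun_induction pvSieveLoop s limit p with
  | case1 s p h ih =>
    intro j hj
    simp only [dite_eq_ite] at ih
    set s' := if s.getD p false = true then pvMark s limit (p * p) p else s with hs'
    have hlen' : s'.length = limit + 1 := by
      rw [hs']; split
      · rw [pvMark_length]; exact hlen
      · exact hlen
    refine ih (by omega) hlen' ?_ j hj
    clear hj
    intro j hj
    by_cases hsp : s.getD p false
    · -- p unmarked: mark its multiples from p*p
      rw [hs', if_pos hsp, pvMark_getD s limit (p * p) p (by omega) (by omega) j, hinv j hj]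
      constructor
      · rintro (⟨a, h2, hlt, hsq, hdvd⟩ | ⟨h1, h2, hdvd⟩)
        · exact ⟨a, h2, by omega, hsq, hdvd⟩
        · refine ⟨p, by omega, by omega, h1, ?_⟩
          have : p ∣ (j - p * p) + p * p := Dvd.dvd.add hdvd ⟨p, rfl⟩
          simpa [Nat.sub_add_cancel h1] using this
      · rintro ⟨a, h2, hlt, hsq, hdvd⟩
        by_cases hap : a = p
        · subst hap
          exact Or.inr ⟨hsq, hj, (Nat.dvd_sub hdvd ⟨a, rfl⟩)⟩
        · exact Or.inl ⟨a, h2, by omega, hsq, hdvd⟩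
    · -- p already marked: it has a smaller witness, so nothing to do
      have hpw : ∃ b, 2 ≤ b ∧ b < p ∧ b * b ≤ p ∧ b ∣ p := by
        have := (hinv p (by omega)).mp (by simpa using hsp)
        exact this
      rw [hs', if_neg hsp, hinv j hj]
      constructor
      · rintro ⟨a, h2, hlt, hsq, hdvd⟩; exact ⟨a, h2, by omega, hsq, hdvd⟩
      · rintro ⟨a, h2, hlt, hsq, hdvd⟩
        by_cases hap : a = p
        · subst hap
          obtain ⟨b, hb2, hbp, hbsq, hbdvd⟩ := hpw
          exact ⟨b, hb2, hbp, by nlinarith, hbdvd.trans hdvd⟩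
        · exact ⟨a, h2, by omega, hsq, hdvd⟩
  | case2 s p h =>
    intro j hj
    rw [hinv j hj]
    constructor
    · rintro ⟨a, h2, _, hsq, hdvd⟩; exact ⟨a, h2, hsq, hdvd⟩
    · rintro ⟨a, h2, hsq, hdvd⟩
      have haa : a ≤ a * a := Nat.le_mul_of_pos_left a (by omega)
      exact ⟨a, h2, by omega, hsq, hdvd⟩

theorem sieve_final (limit : Nat) (j : Nat) (hj : j ≤ limit) :
    ((pvSieveLoop (List.replicate (limit + 1) true) limit 2).getD j false = false ↔
      ∃ a, 2 ≤ a ∧ a * a ≤ j ∧ a ∣ j) := by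
  apply pvSieveLoop_getD _ _ _ le_rfl (by simp)
  · intro k hk
    constructor
    · intro h
      rw [List.getD_eq_getElem?_getD, List.getElem?_replicate, if_pos (by omega)] at h
      simp at h
    · rintro ⟨a, h2, hlt, _⟩; omega
  · exact hj

-- pointwise agreement of the two primality decisions ----------------------

theorem any_iff_scan (m n : Int) (hm : 1 ≤ m) (hn : 2 ≤ n) (hnm : n ≤ m) :
    (((List.range (Nat.sqrt m.toNat + 1)).filter
        (fun p => 2 ≤ p &&
          (pvSieveLoop (List.replicate (Nat.sqrt m.toNat + 1) true) (Nat.sqrt m.toNat) 2).getD p false)).any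
        (fun p => (p : Int) * p ≤ n && PySem.Int.mod n (p : Int) == 0))
      = ! pyIsPrimeScanA n := by
  set limit := Nat.sqrt m.toNat with hlim
  rw [Bool.eq_iff_iff, List.any_eq_true, Bool.not_eq_true', Bool.eq_false_iff, Ne, scanA_iff n hn]
  push Not
  simp only [List.mem_filter, List.mem_range, Bool.and_eq_true, decide_eq_true_eq, beq_iff_eq]
  constructor
  · rintro ⟨p, ⟨hpr, h2, _⟩, hsq, hmod⟩
    exact ⟨(p : Int), by exact_mod_cast h2, hsq,
      (PySem.Int.mod_eq_zero_iff_dvd n (p : Int)).mp hmod⟩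
  · rintro ⟨i, h2, hsq, hdvd⟩
    set a := Nat.minFac n.toNat with ha
    have hn0 : (n.toNat : Int) = n := Int.toNat_of_nonneg (by omega)
    have hnn1 : n.toNat ≠ 1 := by omega
    have hap : Nat.Prime a := Nat.minFac_prime hnn1
    have hidvd : i.toNat ∣ n.toNat := by
      have h1 : (i.toNat : Int) = i := Int.toNat_of_nonneg (by omega)
      rw [← Int.natCast_dvd_natCast, h1, hn0]; exact hdvd
    have hale : a ≤ i.toNat := Nat.minFac_le_of_dvd (by omega) hidvd
    have hadvdN : a ∣ n.toNat := Nat.minFac_dvd _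
    have hiN : i.toNat * i.toNat ≤ n.toNat := by
      have h1 : (i.toNat : Int) = i := Int.toNat_of_nonneg (by omega)
      zify; rw [h1, hn0]; exact hsq
    have haa : a * a ≤ n.toNat := le_trans (Nat.mul_le_mul hale hale) hiN
    have hnmN : n.toNat ≤ m.toNat := by omega
    have halim : a ≤ limit := by
      rw [hlim, Nat.le_sqrt]; exact le_trans haa hnmN
    refine ⟨a, ⟨by omega, hap.two_le, ?_⟩, ?_, ?_⟩
    · -- the sieve keeps a: a prime has no witness divisor
      rcases h : (pvSieveLoop (List.replicate (limit + 1) true) limit 2).getD a false with _ | _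
      · exfalso
        obtain ⟨b, hb2, hbsq, hbdvd⟩ := (sieve_final limit a halim).mp h
        rcases (Nat.Prime.eq_one_or_self_of_dvd hap b hbdvd) with rfl | rfl
        · omega
        · nlinarith [hap.two_le]
      · rfl
    · -- (a : Int) * a ≤ n
      calc ((a : Nat) : Int) * a = ((a * a : Nat) : Int) := by push_cast; ring
        _ ≤ (n.toNat : Int) := by exact_mod_cast haa
        _ = n := hn0
    · rw [PySem.Int.mod_eq_zero_iff_dvd]
      rw [← hn0, Int.natCast_dvd_natCast] at *
      exact_mod_cast hadvdN

-- the two folds agree ----------------------------------------------------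

theorem fold_agree (m : Int) (hm : 1 ≤ m) (l : List Int) (acc : List Int × List Int)
    (hmem : ∀ n ∈ l, n ≤ m) :
    l.foldl
      (fun acc num =>
        if num < 2 then (acc.1, acc.2 ++ [num])
        else if pyIsPrimeScanA num then (acc.1 ++ [num], acc.2)
        else (acc.1, acc.2 ++ [num])) acc
    = l.foldl
      (fun acc n =>
        if n < 2 then (acc.1, acc.2 ++ [n])
        else if ((List.range (Nat.sqrt m.toNat + 1)).filter
            (fun p => 2 ≤ p &&
              (pvSieveLoop (List.replicate (Nat.sqrt m.toNat + 1) true) (Nat.sqrt m.toNat) 2).getD p false)).any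
            (fun p => (p : Int) * p ≤ n && PySem.Int.mod n (p : Int) == 0) then
          (acc.1, acc.2 ++ [n])
        else (acc.1 ++ [n], acc.2)) acc := by
  induction l generalizing acc with
  | nil => rfl
  | cons x l ih =>
    simp only [List.foldl_cons]
    have hx : x ≤ m := hmem x (by simp)
    rw [← ih _ (fun n hn => hmem n (by simp [hn]))]
    congr 1
    by_cases h1 : x < 2
    · simp [h1]
    · rw [if_neg h1, if_neg h1, any_iff_scan m x hm (by omega) hx]
      cases pyIsPrimeScanA x <;> simp

-- ===== VERDICT (by name: the statement is the Claim_ definition above) =====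
theorem separate_prime_composite_spec : Claim_equal_separate_prime_composite := by
  intro numbers _
  unfold Spec_separate_prime_composite separate_prime_composite separate_prime_composite_alt
  simp only []
  have h := foldl_max_ge numbers 1
  exact fold_agree _ h.1 numbers ([], []) h.2
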